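-- pv_equiv track=rewrite | github.com/ZiruiSongBest/CataIEG | catalysis-graph-pipeline/scripts/build_graph/llm_dedup_catalyst_families.py | _resolve_transitive
-- ===== SOURCE A (Python) =====
-- def _resolve_transitive(mapping):
--     def find(x, depth=0):
--         if depth > 50:
--             return x
--         nxt = mapping.get(x, x)
--         if nxt == x:
--             return x
--         return find(nxt, depth + 1)
--     return {k: find(k) for k in mapping}
-- ===== SOURCE B (Python) =====
-- def _resolve_transitive(mapping):
--     def chase(x):
--         for _ in range(51):
--             nxt = mapping.get(x, x)
--             if nxt == x:
--                 return x
--             x = nxt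
--         return x
--     return {k: chase(k) for k in mapping}
-- ===== Notes on version B (the rewrite author's own statement) =====
-- stated objective: simpler
-- what changed: The recursive depth-counting helper 'find' is replaced by an iterative 'chase' that follows the mapping in a bounded for-loop of 51 steps with an early return at a fixed point; no recursion and no depth parameter.
import Mathlib
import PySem

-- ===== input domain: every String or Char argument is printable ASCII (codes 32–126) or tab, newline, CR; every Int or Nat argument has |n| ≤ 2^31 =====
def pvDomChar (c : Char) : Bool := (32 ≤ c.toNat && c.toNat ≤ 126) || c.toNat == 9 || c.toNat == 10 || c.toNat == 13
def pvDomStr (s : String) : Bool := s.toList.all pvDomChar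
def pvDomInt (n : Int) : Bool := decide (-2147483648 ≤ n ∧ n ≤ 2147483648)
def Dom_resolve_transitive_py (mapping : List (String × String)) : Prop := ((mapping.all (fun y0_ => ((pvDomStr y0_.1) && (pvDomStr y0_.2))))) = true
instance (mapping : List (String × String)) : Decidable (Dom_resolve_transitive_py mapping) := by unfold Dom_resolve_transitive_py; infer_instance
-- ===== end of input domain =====

-- B replaces the recursive depth-counting helper by an iterative bounded chase loop (same cost; simpler decomposition).

-- ===== PORT A =====
-- find(x, depth): recursion counting depth UP, capped at depth > 50.
def pvFindA (d : PySem.Dict String String) (x : String) (depth : Int) : String :=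
  if depth > 50 then x
  else
    let nxt := d.getD x x
    if nxt = x then x
    else pvFindA d nxt (depth + 1)
termination_by (51 - depth).toNat
decreasing_by omega

-- {k: find(k) for k in mapping}: a dict comprehension built by insertion, returned as its items list.
def resolve_transitive_py (mapping : List (String × String)) : List (String × String) :=
  let d := PySem.Dict.ofList mapping
  (d.keys.foldl (fun acc k => acc.insert k (pvFindA d k 0)) PySem.Dict.empty).items

-- ===== PORT B =====
-- chase(x): for _ in range(51): follow one step, early return at a fixed point (count runs DOWN).
def pvChaseB (d : PySem.Dict String String) (steps : Nat) (x : String) : String :=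
  match steps with
  | 0 => x
  | n + 1 =>
    let nxt := d.getD x x
    if nxt = x then x
    else pvChaseB d n nxt

-- the comprehension ranges over the dict's distinct keys, so it is the items list directly
def resolve_transitive_py_alt (mapping : List (String × String)) : List (String × String) :=
  let d := PySem.Dict.ofList mapping
  d.keys.map (fun k => (k, pvChaseB d 51 k))

-- ===== PRECONDITION & SPEC =====
def Spec_resolve_transitive_py (mapping : List (String × String)) (out : List (String × String)) : Prop := out = resolve_transitive_py_alt mapping
instance (mapping : List (String × String)) (out : List (String × String)) : Decidable (Spec_resolve_transitive_py mapping out) := by unfold Spec_resolve_transitive_py; infer_instance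

-- ===== CLAIM (what is proved, stated in full; the proofs are below) =====
def Claim_equal_resolve_transitive_py : Prop := ∀ (mapping : List (String × String)), Dom_resolve_transitive_py mapping → Spec_resolve_transitive_py mapping (resolve_transitive_py mapping)

-- ===== LEMMAS AND PROOFS =====

-- the up-counting recursion at depth 51 - n equals the down-counting loop with n steps left
theorem pvFindA_eq_chase (d : PySem.Dict String String) :
    ∀ (n : Nat), n ≤ 51 → ∀ (x : String), pvFindA d x (51 - (n : Int)) = pvChaseB d n x := by
  intro n
  induction n with
  | zero =>
    intro _ x
    rw [pvFindA]
    simp [pvChaseB]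
  | succ n ih =>
    intro hn x
    rw [pvFindA]
    have h1 : ¬ (51 - ((n + 1 : Nat) : Int) > 50) := by push_cast; omega
    simp only [h1, if_false, pvChaseB]
    split
    · rfl
    · have h2 : 51 - ((n + 1 : Nat) : Int) + 1 = 51 - (n : Int) := by push_cast; omega
      rw [h2, ih (by omega)]

-- ===== VERDICT (by name: the statement is the Claim_ definition above) =====
theorem resolve_transitive_py_spec : Claim_equal_resolve_transitive_py := by
  intro mapping _
  unfold Spec_resolve_transitive_py resolve_transitive_py resolve_transitive_py_alt
  dsimp only
  set d := PySem.Dict.ofList mapping with hd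
  refine Eq.trans (PySem.Dict.items_foldl_insert_fresh (l := d.keys) (d := PySem.Dict.empty)
      (k := id) (v := fun k => pvFindA d k 0)
      (by intro a _; exact PySem.Dict.contains_empty a)
      (by simp only [List.map_id]; exact PySem.Dict.nodup_keys_ofList mapping)) ?_
  simp only [id]
  rw [show (PySem.Dict.empty : PySem.Dict String String).items = [] from rfl, List.nil_append]
  refine List.map_congr_left ?_
  intro k _
  have := pvFindA_eq_chase d 51 (le_refl 51) k
  norm_num at this
  rw [this]
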